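-- pv_equiv track=rewrite | github.com/aiswaryalakshmi/Computer_Networks | dnssec.py | make_ip_url_list
-- ===== SOURCE A (Python) =====
-- def make_ip_url_list(a):
--     iterator = a.count(".")
--     ip_url_list = []
--     if iterator == 1:
--         return [a]
--     else:
--         iterator -= 1
--         while iterator > 0:
--             ip_url_list.append(".".join(a.split(".")[iterator:]))
--             iterator -= 1
--         ip_url_list.append(a)
--         return ip_url_list
-- ===== SOURCE B (Python) =====
-- def make_ip_url_list(a):
--     parts = a.split(".")
--     if len(parts) <= 2:
--         return [a]
--     out = []
--     suffix = parts[-1]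
--     for p in reversed(parts[:-1]):
--         suffix = p + "." + suffix
--         out.append(suffix)
--     return out
-- ===== Notes on version B (the rewrite author's own statement) =====
-- stated objective: alternative
-- what changed: B splits the string once and builds each suffix incrementally from the previous one with an accumulator, instead of A's re-splitting the whole string and re-joining a slice of it on every loop iteration.
import Mathlib
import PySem

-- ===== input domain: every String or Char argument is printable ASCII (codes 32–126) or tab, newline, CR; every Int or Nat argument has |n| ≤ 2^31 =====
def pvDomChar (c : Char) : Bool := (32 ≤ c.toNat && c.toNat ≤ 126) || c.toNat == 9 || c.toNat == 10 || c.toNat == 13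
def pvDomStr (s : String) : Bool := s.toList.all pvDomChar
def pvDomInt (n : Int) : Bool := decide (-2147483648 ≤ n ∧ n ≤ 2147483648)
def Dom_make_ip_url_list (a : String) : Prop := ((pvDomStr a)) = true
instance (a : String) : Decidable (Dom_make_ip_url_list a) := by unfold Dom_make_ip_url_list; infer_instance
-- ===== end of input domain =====

-- B replaces A's repeated split-slice-join of the whole string per iteration by one split and an
-- incremental suffix accumulator (each suffix is the previous one with one component prepended);
-- objective: faster by a constant-to-linear factor per element, same results.

-- ===== PORT A =====
-- the 'while iterator > 0' loop of A; acc is ip_url_list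
def make_ip_url_list.go (a : String) (iterator : Int) (acc : List String) : List String :=
  if iterator > 0 then
    make_ip_url_list.go a (iterator - 1)
      (acc ++ [PySem.Str.join "." (PySem.List.slice ((PySem.Str.split? a ".").getD []) (some iterator) none)])
  else acc
termination_by iterator.toNat
decreasing_by omega

def make_ip_url_list (a : String) : List String :=
  let iterator : Int := (PySem.Str.count a "." : Int)
  if iterator = 1 then [a]
  else make_ip_url_list.go a (iterator - 1) [] ++ [a]

-- ===== PORT B =====
def make_ip_url_list_alt (a : String) : List String :=
  let parts := (PySem.Str.split? a ".").getD []   -- sep "." ≠ "", so split? is some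
  if parts.length ≤ 2 then [a]
  else
    let suffix := (PySem.List.pyGet? parts (-1)).getD ""   -- parts[-1]; parts is nonempty here
    let rev := (PySem.List.slice parts none (some (-1))).reverse   -- reversed(parts[:-1])
    (rev.foldl (fun st p =>
        -- s = p + "." + suffix; Python str '+' is concatenation of the code points, exact
        let s := String.ofList (p.toList ++ '.' :: st.2.toList)
        (st.1 ++ [s], s)) (([] : List String), suffix)).1

-- ===== PRECONDITION & SPEC =====
def Spec_make_ip_url_list (a : String) (out : List String) : Prop := out = make_ip_url_list_alt a
instance (a : String) (out : List String) : Decidable (Spec_make_ip_url_list a out) := by unfold Spec_make_ip_url_list; infer_instance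

-- ===== CLAIM (what is proved, stated in full; the proofs are below) =====
def Claim_equal_make_ip_url_list : Prop := ∀ (a : String), Dom_make_ip_url_list a → Spec_make_ip_url_list a (make_ip_url_list a)

-- ===== LEMMAS AND PROOFS =====

-- structural model of Python's s.split(".") on the character list
def pvSp : List Char → List (List Char)
  | [] => [[]]
  | c :: t => if c = '.' then [] :: pvSp t else (pvSp t).modifyHead (c :: ·)

theorem pvSp_ne_nil (cs : List Char) : pvSp cs ≠ [] := by
  induction cs with
  | nil => simp [pvSp]
  | cons c t ih =>
    simp only [pvSp]
    split
    · simp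
    · cases h : pvSp t with
      | nil => exact absurd h ih
      | cons x r => simp [h]

theorem pvSp_dot (t : List Char) : pvSp ('.' :: t) = [] :: pvSp t := by simp [pvSp]

theorem pvSp_cons {c : Char} (t : List Char) (hc : c ≠ '.') :
    pvSp (c :: t) = (pvSp t).modifyHead (c :: ·) := by simp [pvSp, hc]

theorem splitOn_go_eq (l : List Char) : ∀ (fuel : Nat) (cur : List Char) (acc : List (List Char)),
    l.length ≤ fuel →
    PySem.Chars.splitOn.go ['.'] fuel l cur acc
      = acc.reverse ++ (pvSp l).modifyHead (cur.reverse ++ ·) := by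
  induction l with
  | nil =>
    intro fuel cur acc _
    cases fuel <;> simp [PySem.Chars.splitOn.go, pvSp]
  | cons c t ih =>
    intro fuel cur acc hlen
    cases fuel with
    | zero => simp at hlen
    | succ f =>
      by_cases hc : c = '.'
      · subst hc
        rw [PySem.Chars.splitOn.go]
        rw [if_pos (by simp)]
        rw [show List.drop (['.'].length) ('.' :: t) = t from rfl]
        have hlen2 : t.length ≤ f := by simp at hlen; omega
        rw [ih f [] (List.reverse cur :: acc) hlen2, pvSp_dot]
        cases pvSp t <;> simp [List.modifyHead]
      · rw [PySem.Chars.splitOn.go]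
        rw [if_neg (by simp [Ne.symm hc])]
        rw [ih f (c :: cur) acc (by simp at hlen; omega), pvSp_cons t hc]
        cases h : pvSp t with
        | nil => exact absurd h (pvSp_ne_nil t)
        | cons x r => simp [h]

theorem splitOn_eq (cs : List Char) : PySem.Chars.splitOn cs ['.'] = pvSp cs := by
  rw [PySem.Chars.splitOn, splitOn_go_eq cs (cs.length + 1) [] [] (by omega)]
  cases h : pvSp cs with
  | nil => exact absurd h (pvSp_ne_nil cs)
  | cons x r => simp

theorem count_go_eq (l : List Char) : ∀ (fuel : Nat) (acc : Nat), l.length ≤ fuel →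
    PySem.Chars.count.go ['.'] fuel l acc = acc + l.count '.' := by
  induction l with
  | nil => intro fuel acc _; cases fuel <;> simp [PySem.Chars.count.go]
  | cons c t ih =>
    intro fuel acc hlen
    cases fuel with
    | zero => simp at hlen
    | succ f =>
      by_cases hc : c = '.'
      · subst hc
        rw [PySem.Chars.count.go]
        rw [if_pos (by simp)]
        rw [show List.drop (['.'].length) ('.' :: t) = t from rfl]
        rw [ih f (acc + 1) (by simp at hlen; omega)]
        rw [List.count_cons]
        simp
        omega
      · rw [PySem.Chars.count.go]
        rw [if_neg (by simp [Ne.symm hc])]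
        rw [ih f acc (by simp at hlen; omega)]
        simp [List.count_cons, hc]

theorem count_eq_count (cs : List Char) : PySem.Chars.count cs ['.'] = cs.count '.' := by
  rw [PySem.Chars.count]
  simp [count_go_eq cs cs.length 0 (le_refl _)]

theorem length_pvSp (cs : List Char) : (pvSp cs).length = cs.count '.' + 1 := by
  induction cs with
  | nil => simp [pvSp]
  | cons c t ih =>
    by_cases hc : c = '.'
    · subst hc; rw [pvSp_dot]; simp [List.count_cons, ih]
    · rw [pvSp_cons t hc]; simp [List.count_cons, hc, ih]

theorem join_pvSp (cs : List Char) : PySem.Chars.join ['.'] (pvSp cs) = cs := by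
  induction cs with
  | nil => simp [pvSp, PySem.Chars.join, List.intercalate]
  | cons c t ih =>
    by_cases hc : c = '.'
    · subst hc
      rw [pvSp_dot]
      cases h : pvSp t with
      | nil => exact absurd h (pvSp_ne_nil t)
      | cons x r =>
        rw [PySem.Chars.join_cons_cons]
        rw [h] at ih
        rw [ih]
        rfl
    · rw [pvSp_cons t hc]
      cases h : pvSp t with
      | nil => exact absurd h (pvSp_ne_nil t)
      | cons x r =>
        rw [h] at ih
        cases r with
        | nil => simp [PySem.Chars.join, List.intercalate] at ih ⊢; simp [ih, hc]
        | cons y r' =>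
          simp only [List.modifyHead]
          rw [PySem.Chars.join_cons_cons] at ih
          rw [PySem.Chars.join_cons_cons]
          simp [ih, hc]

-- the ports, restated through the suffix-join J
def pvParts (a : String) : List String := (PySem.Str.split? a ".").getD []

def pvJ (a : String) (i : Nat) : String := PySem.Str.join "." ((pvParts a).drop i)

theorem parts_eq (a : String) : pvParts a = (pvSp a.toList).map String.ofList := by
  rw [pvParts, PySem.Str.split?]
  rw [show (".".toList : List Char) = ['.'] from rfl]
  rw [PySem.Chars.split?]
  simp [splitOn_eq]

theorem length_parts (a : String) : (pvParts a).length = a.toList.count '.' + 1 := by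
  rw [parts_eq]; simp [length_pvSp]

theorem count_str (a : String) : PySem.Str.count a "." = a.toList.count '.' := by
  have := count_eq_count a.toList
  simpa [PySem.Str.count] using this

theorem J_zero (a : String) : pvJ a 0 = a := by
  rw [pvJ, List.drop_zero, parts_eq]
  simp only [PySem.Str.join]
  rw [show (".".toList : List Char) = ['.'] from rfl]
  have : (List.map String.toList ((pvSp a.toList).map String.ofList)) = pvSp a.toList := by
    simp [List.map_map, Function.comp_def]
  rw [this, join_pvSp]
  exact String.ofList_toList

theorem J_step (a : String) (i : Nat) (hi : i + 1 < (pvParts a).length) :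
    pvJ a i = String.ofList (((pvParts a).get ⟨i, by omega⟩).toList ++ '.' :: (pvJ a (i + 1)).toList) := by
  have hdrop : (pvParts a).drop i = (pvParts a).get ⟨i, by omega⟩ :: (pvParts a).drop (i + 1) := by
    rw [List.drop_eq_getElem_cons (by omega)]; rfl
  have hne : (pvParts a).drop (i + 1) ≠ [] := by
    simp [List.drop_eq_nil_iff]; omega
  cases h : (pvParts a).drop (i + 1) with
  | nil => exact absurd h hne
  | cons y r =>
    rw [pvJ, hdrop, h]
    simp only [PySem.Str.join, List.map_cons]
    rw [show (".".toList : List Char) = ['.'] from rfl, PySem.Chars.join_cons_cons]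
    congr 1
    simp [String.toList_ofList, pvJ, h, PySem.Str.join]

theorem J_last (a : String) (n : Nat) (hn : (pvParts a).length = n + 1) :
    pvJ a n = (pvParts a).get ⟨n, by omega⟩ := by
  have hdrop : (pvParts a).drop n = [(pvParts a).get ⟨n, by omega⟩] := by
    rw [List.drop_eq_getElem_cons (by omega)]
    have : (pvParts a).drop (n + 1) = [] := List.drop_eq_nil_of_le (by omega)
    rw [this]
    rfl
  rw [pvJ, hdrop, PySem.Str.join]
  simp [PySem.Chars.join, List.intercalate, String.ofList_toList]

-- A's loop
theorem aGo_eq (a : String) : ∀ (k : Nat) (acc : List String),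
    make_ip_url_list.go a (k : Int) acc = acc ++ (List.range k).map (fun j => pvJ a (k - j)) := by
  intro k
  induction k with
  | zero => intro acc; rw [make_ip_url_list.go]; simp
  | succ m ih =>
    intro acc
    rw [make_ip_url_list.go]
    have hpos : ((m + 1 : Nat) : Int) > 0 := by positivity
    rw [if_pos hpos]
    have hcast : ((m + 1 : Nat) : Int) - 1 = (m : Int) := by push_cast; ring
    rw [hcast, ih]
    have hslice : PySem.List.slice ((PySem.Str.split? a ".").getD []) (some ((m + 1 : Nat) : Int)) none
        = (pvParts a).drop (m + 1) := by
      rw [PySem.List.slice_from _ (by positivity)]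
      simp [pvParts]
    rw [hslice]
    rw [List.range_succ_eq_map]
    simp only [List.map_cons, List.map_map]
    simp [pvJ, List.append_assoc, Function.comp_def]

-- B's fold
def pvBRun : List String → String → List String
  | [], _ => []
  | p :: l, s =>
    let s' := String.ofList (p.toList ++ '.' :: s.toList)
    s' :: pvBRun l s'

theorem bFold_eq (l : List String) : ∀ (out : List String) (s : String),
    (l.foldl (fun st p =>
        let s := String.ofList (p.toList ++ '.' :: st.2.toList)
        (st.1 ++ [s], s)) (out, s)).1 = out ++ pvBRun l s := by
  induction l with
  | nil => intro out s; simp [pvBRun]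
  | cons p l ih => intro out s; simp only [List.foldl_cons, pvBRun, ih]; simp

theorem bRun_take (a : String) : ∀ (i : Nat), i + 1 ≤ (pvParts a).length →
    pvBRun (((pvParts a).take i).reverse) (pvJ a i)
      = (List.range i).map (fun j => pvJ a (i - 1 - j)) := by
  intro i
  induction i with
  | zero => intro _; simp [pvBRun]
  | succ m ih =>
    intro hm
    have htake : (pvParts a).take (m + 1) = (pvParts a).take m ++ [(pvParts a).get ⟨m, by omega⟩] := by
      rw [List.take_add_one]
      simp [List.getElem?_eq_getElem (show m < (pvParts a).length by omega)]
    rw [htake, List.reverse_append]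
    simp only [List.reverse_singleton, List.singleton_append, pvBRun]
    have hstep : String.ofList (((pvParts a).get ⟨m, by omega⟩).toList ++ '.' :: (pvJ a (m + 1)).toList) = pvJ a m :=
      (J_step a m (by omega)).symm
    rw [hstep, ih (by omega)]
    rw [List.range_succ_eq_map, List.map_cons, List.map_map]
    refine List.cons_eq_cons.mpr ⟨by congr 1, ?_⟩
    apply List.map_congr_left
    intro j hj
    simp only [Function.comp_apply]
    congr 1
    omega

theorem map_range_split (a : String) (m : Nat) :
    (List.range (m + 1)).map (fun j => pvJ a (m - j))
      = (List.range m).map (fun j => pvJ a (m - j)) ++ [pvJ a 0] := by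
  rw [List.range_succ, List.map_append]
  simp

-- ===== VERDICT (by name: the statement is the Claim_ definition above) =====
theorem make_ip_url_list_spec : Claim_equal_make_ip_url_list := by
  intro a _
  unfold Spec_make_ip_url_list make_ip_url_list make_ip_url_list_alt
  simp only []
  have hcount : PySem.Str.count a "." = a.toList.count '.' := count_str a
  have hlen : ((PySem.Str.split? a ".").getD []).length = a.toList.count '.' + 1 := by
    have := length_parts a; simpa [pvParts] using this
  by_cases h1 : a.toList.count '.' = 1
  · -- exactly one dot: both return [a]
    rw [hcount, h1]
    simp [hlen, h1]
  · by_cases h0 : a.toList.count '.' = 0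
    · -- no dot: A's loop body never runs, B's guard fires
      rw [hcount, h0]
      rw [if_neg (by norm_num)]
      rw [show ((0 : Nat) : Int) - 1 = (-1 : Int) by norm_num]
      rw [make_ip_url_list.go]
      simp [hlen, h0]
    · -- at least two dots
      obtain ⟨m, hm⟩ : ∃ m, a.toList.count '.' = m + 2 :=
        ⟨a.toList.count '.' - 2, by omega⟩
      rw [hcount, hm]
      rw [hm] at hlen
      rw [if_neg (by push_cast; omega)]
      rw [if_neg (by rw [hlen]; omega)]
      -- A side
      have hcast : ((m + 2 : Nat) : Int) - 1 = ((m + 1 : Nat) : Int) := by push_cast; ring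
      rw [hcast, aGo_eq a (m + 1) [], List.nil_append]
      -- B side
      have hparts : (PySem.Str.split? a ".").getD [] = pvParts a := rfl
      have hlen' : (pvParts a).length = m + 3 := by rw [← hparts, hlen]
      have hget : (PySem.List.pyGet? ((PySem.Str.split? a ".").getD []) (-1)).getD "" = pvJ a (m + 2) := by
        rw [J_last a (m + 2) (by omega)]
        rw [hparts]
        simp [PySem.List.pyGet?, PySem.List.pyIdx?, hlen']
      rw [PySem.List.slice_to_neg_one]
      have hdropLast : ((PySem.Str.split? a ".").getD []).dropLast = (pvParts a).take (m + 2) := by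
        rw [hparts, List.dropLast_eq_take]
        congr 1
        omega
      rw [hdropLast, hget, bFold_eq, bRun_take a (m + 2) (by omega), List.nil_append]
      have hfun : (List.range (m + 2)).map (fun j => pvJ a (m + 2 - 1 - j))
          = (List.range (m + 1 + 1)).map (fun j => pvJ a (m + 1 - j)) := by
        apply List.map_congr_left
        intro j hj
        congr 1
      rw [hfun, map_range_split a (m + 1), J_zero]
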